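-- pv_equiv track=rewrite | github.com/adolf94/kuryente-app | backend-1/deps/azure_blob.py | _extract_account_info_from_connection_string
-- ===== SOURCE A (Python) =====
-- def _extract_account_info_from_connection_string(conn_str):
--     parts = conn_str.split(';')
--     account_name = None
--     account_key = None
--     for part in parts:
--         if part.startswith('AccountName='):
--             account_name = part.split('=', 1)[1]
--         elif part.startswith('AccountKey='):
--             account_key = part.split('=', 1)[1]
--     return account_name, account_key
-- ===== SOURCE B (Python) =====
-- def _extract_account_info_from_connection_string(conn_str):
--     d = {}
--     for part in conn_str.split(';'):
--         kv = part.split('=', 1)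
--         if len(kv) == 2:
--             d[kv[0]] = kv[1]
--     return d.get('AccountName'), d.get('AccountKey')
-- ===== Notes on version B (the rewrite author's own statement) =====
-- stated objective: idiomatic
-- what changed: Replaces per-part prefix-branching on the two hard-coded keys by building a generic key-to-value index of the parts that contain a separator and then looking up AccountName/AccountKey (last-write-wins matches A's loop overwrite).
import Mathlib
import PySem

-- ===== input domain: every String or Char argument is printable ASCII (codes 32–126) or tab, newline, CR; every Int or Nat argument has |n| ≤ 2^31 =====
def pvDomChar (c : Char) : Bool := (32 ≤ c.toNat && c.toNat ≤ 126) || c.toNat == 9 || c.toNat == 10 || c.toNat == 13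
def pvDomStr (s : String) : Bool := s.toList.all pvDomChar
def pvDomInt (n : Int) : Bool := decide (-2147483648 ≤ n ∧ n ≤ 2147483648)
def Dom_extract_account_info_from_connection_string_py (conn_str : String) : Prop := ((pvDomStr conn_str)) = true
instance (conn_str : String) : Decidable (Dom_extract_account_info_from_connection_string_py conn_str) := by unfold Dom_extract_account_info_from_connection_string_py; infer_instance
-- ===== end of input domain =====

-- B builds a key→value index of all '='-bearing parts and then looks the two accounts up (idiomatic); A = B is proved on all inputs.

-- ===== PORT A =====
-- one step of A's for-loop (the pyGet? index 1 is always in range because the startswith guard holds)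
def pyAStep (st : Option String × Option String) (part : String) : Option String × Option String :=
  if PySem.Str.startswith part "AccountName=" then
    (PySem.List.pyGet? ((PySem.Str.splitMax? part "=" 1).getD []) 1, st.2)
  else if PySem.Str.startswith part "AccountKey=" then
    (st.1, PySem.List.pyGet? ((PySem.Str.splitMax? part "=" 1).getD []) 1)
  else st

def extract_account_info_from_connection_string_py (conn_str : String) : Option String × Option String :=
  -- split? is some because the separator ";" is nonempty
  let parts := (PySem.Str.split? conn_str ";").getD []
  parts.foldl pyAStep (none, none)

-- ===== PORT B =====
-- one step of B's for-loop: kv = part.split('=', 1); if len(kv) == 2: d[kv[0]] = kv[1]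
def pyBStep (d : PySem.Dict String String) (part : String) : PySem.Dict String String :=
  match (PySem.Str.splitMax? part "=" 1).getD [] with
  | [k, v] => d.insert k v
  | _ => d

def extract_account_info_from_connection_string_py_alt (conn_str : String) : Option String × Option String :=
  let d := ((PySem.Str.split? conn_str ";").getD []).foldl pyBStep PySem.Dict.empty
  (d.get? "AccountName", d.get? "AccountKey")

-- ===== PRECONDITION & SPEC =====
def Spec_extract_account_info_from_connection_string_py (conn_str : String) (out : Option String × Option String) : Prop := out = extract_account_info_from_connection_string_py_alt conn_str
instance (conn_str : String) (out : Option String × Option String) : Decidable (Spec_extract_account_info_from_connection_string_py conn_str out) := by unfold Spec_extract_account_info_from_connection_string_py; infer_instance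

-- ===== CLAIM (what is proved, stated in full; the proofs are below) =====
def Claim_equal_extract_account_info_from_connection_string_py : Prop := ∀ (conn_str : String), Dom_extract_account_info_from_connection_string_py conn_str → Spec_extract_account_info_from_connection_string_py conn_str (extract_account_info_from_connection_string_py conn_str)

-- ===== LEMMAS AND PROOFS =====

-- splitOnMax.go with maxsplit 0 returns the remainder as one piece
theorem go_zero (sep : List Char) (fuel : Nat) (l cur : List Char) (acc : List (List Char)) :
    PySem.Chars.splitOnMax.go sep fuel 0 l cur acc = ((cur.reverse ++ l) :: acc).reverse := by
  cases fuel <;> cases l <;> simp [PySem.Chars.splitOnMax.go]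

-- splitOnMax.go with maxsplit 1 and sep '=' splits at the first '='
theorem go_one (l : List Char) : ∀ (fuel : Nat) (cur : List Char) (acc : List (List Char)),
    l.length < fuel →
    PySem.Chars.splitOnMax.go ['='] fuel 1 l cur acc =
      if '=' ∈ l then
        acc.reverse ++ [cur.reverse ++ l.takeWhile (· ≠ '='), (l.dropWhile (· ≠ '=')).tail]
      else acc.reverse ++ [cur.reverse ++ l] := by
  induction l with
  | nil =>
    intro fuel cur acc h
    cases fuel with
    | zero => omega
    | succ f => simp [PySem.Chars.splitOnMax.go]
  | cons c rest ih =>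
    intro fuel cur acc h
    cases fuel with
    | zero => omega
    | succ f =>
      by_cases hc : c = '='
      · subst hc
        simp [PySem.Chars.splitOnMax.go, List.isPrefixOf, go_zero]
      · have hpre : List.isPrefixOf ['='] (c :: rest) = false := by
          simp [List.isPrefixOf]; exact fun h' => (hc h'.symm).elim
        have hrec : PySem.Chars.splitOnMax.go ['='] (f + 1) 1 (c :: rest) cur acc
            = PySem.Chars.splitOnMax.go ['='] f 1 rest (c :: cur) acc := by
          simp [PySem.Chars.splitOnMax.go, hpre]
        rw [hrec, ih f (c :: cur) acc (by simpa using Nat.lt_of_succ_lt_succ h)]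
        by_cases hm : '=' ∈ rest
        · have hmem : '=' ∈ (c :: rest) := List.mem_cons_of_mem _ hm
          simp [hm, hmem, hc]
        · have hmem : '=' ∉ (c :: rest) := by
            simp only [List.mem_cons, hm, or_false]
            exact fun h' => hc h'.symm
          simp [hm, hmem]

-- character-level characterisation of part.split('=', 1)
theorem splitMax1_chars (p : List Char) :
    PySem.Chars.splitMax? p ['='] 1 =
      some (if '=' ∈ p then [p.takeWhile (· ≠ '='), (p.dropWhile (· ≠ '=')).tail] else [p]) := by
  have h := go_one p (p.length + 1) [] [] (by omega)
  simp only [PySem.Chars.splitMax?, PySem.Chars.splitOnMax]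
  norm_num
  rw [h]
  split_ifs <;> simp

-- string-level characterisation of part.split('=', 1)
theorem splitMax1_str (p : String) :
    (PySem.Str.splitMax? p "=" 1).getD [] =
      if '=' ∈ p.toList then
        [String.ofList (p.toList.takeWhile (· ≠ '=')), String.ofList ((p.toList.dropWhile (· ≠ '=')).tail)]
      else [p] := by
  have hsep : ("=" : String).toList = ['='] := by decide
  simp only [PySem.Str.splitMax?, hsep, splitMax1_chars]
  split_ifs <;> simp

theorem takeWhile_key (k t : List Char) (hk : '=' ∉ k) :
    (k ++ '=' :: t).takeWhile (· ≠ '=') = k ∧ (k ++ '=' :: t).dropWhile (· ≠ '=') = '=' :: t := by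
  induction k with
  | nil => simp
  | cons c cs ih =>
    have hc : c ≠ '=' := fun h => hk (by simp [h])
    have h2 := ih (fun h => hk (by simp [h]))
    simpa [List.takeWhile_cons, List.dropWhile_cons, hc] using h2

theorem dropWhile_mem (p : List Char) (hm : '=' ∈ p) :
    p = p.takeWhile (· ≠ '=') ++ '=' :: (p.dropWhile (· ≠ '=')).tail := by
  induction p with
  | nil => simp at hm
  | cons c rest ih =>
    by_cases hc : c = '='
    · subst hc; simp
    · have hm' : '=' ∈ rest := by
        rcases List.mem_cons.mp hm with h | h
        · exact (hc h.symm).elim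
        · exact h
      simp only [List.takeWhile_cons, List.dropWhile_cons]
      simpa [hc] using ih hm'

-- startswith (K ++ "=") is exactly "the key before the first '=' is K"
theorem startswith_key_iff (p k : List Char) (hk : '=' ∉ k) :
    PySem.Chars.startswith p (k ++ ['=']) = true ↔ ('=' ∈ p ∧ p.takeWhile (· ≠ '=') = k) := by
  rw [PySem.Chars.startswith_iff]
  constructor
  · rintro ⟨t, ht⟩
    have hp : p = k ++ '=' :: t := by simpa using ht.symm
    subst hp
    exact ⟨by simp, (takeWhile_key k t hk).1⟩
  · rintro ⟨hm, htw⟩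
    refine ⟨(p.dropWhile (· ≠ '=')).tail, ?_⟩
    conv_rhs => rw [dropWhile_mem p hm]
    rw [htw]; simp

theorem ofList_eq_iff (k : List Char) (s : String) :
    String.ofList k = s ↔ k = s.toList := by
  constructor
  · intro h; rw [← h]; simp
  · intro h; rw [h]; simp

theorem startswith_str (p : String) (K Keq : String) (hk : '=' ∉ K.toList)
    (hKeq : Keq.toList = K.toList ++ ['=']) :
    PySem.Str.startswith p Keq = true ↔ ('=' ∈ p.toList ∧ p.toList.takeWhile (· ≠ '=') = K.toList) := by
  show PySem.Chars.startswith p.toList Keq.toList = true ↔ _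
  rw [hKeq, startswith_key_iff p.toList K.toList hk]

-- one loop step: A's state update matches the two lookups into B's updated dict
theorem step_lemma (d : PySem.Dict String String) (p : String) :
    pyAStep (d.get? "AccountName", d.get? "AccountKey") p
      = ((pyBStep d p).get? "AccountName", (pyBStep d p).get? "AccountKey") := by
  have hName := startswith_str p "AccountName" "AccountName=" (by decide) (by decide)
  have hKey := startswith_str p "AccountKey" "AccountKey=" (by decide) (by decide)
  by_cases hm : '=' ∈ p.toList
  · -- p splits into key/value; B inserts, A updates iff the key matches
    have hkv := splitMax1_str p
    rw [if_pos hm] at hkv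
    set K := p.toList.takeWhile (· ≠ '=') with hK
    set V := (p.toList.dropWhile (· ≠ '=')).tail with hV
    have hB : pyBStep d p = d.insert (String.ofList K) (String.ofList V) := by
      simp [pyBStep, hkv]
    by_cases h1 : K = ("AccountName" : String).toList
    · have hsw : PySem.Str.startswith p "AccountName=" = true := hName.mpr ⟨hm, h1⟩
      have hkeq : String.ofList K = "AccountName" := (ofList_eq_iff K _).mpr h1
      simp only [pyAStep, hsw, if_true]
      rw [hkv, hB, hkeq]
      simp [PySem.List.pyGet?, PySem.List.pyIdx?, PySem.Dict.get?_insert_self,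
        PySem.Dict.get?_insert_of_ne d (String.ofList V)
          (show ("AccountKey" : String) ≠ "AccountName" by decide)]
    · by_cases h2 : K = ("AccountKey" : String).toList
      · have hsw2 : PySem.Str.startswith p "AccountKey=" = true := hKey.mpr ⟨hm, h2⟩
        have hsw1 : PySem.Str.startswith p "AccountName=" = false := by
          rw [Bool.eq_false_iff]
          intro h'
          exact h1 ((hName.mp h').2)
        have hkeq : String.ofList K = "AccountKey" := (ofList_eq_iff K _).mpr h2
        simp only [pyAStep, hsw1, hsw2, Bool.false_eq_true, if_false, if_true]
        rw [hkv, hB, hkeq]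
        simp [PySem.List.pyGet?, PySem.List.pyIdx?, PySem.Dict.get?_insert_self,
          PySem.Dict.get?_insert_of_ne d (String.ofList V)
            (show ("AccountName" : String) ≠ "AccountKey" by decide)]
      · have hsw1 : PySem.Str.startswith p "AccountName=" = false := by
          rw [Bool.eq_false_iff]; intro h'; exact h1 ((hName.mp h').2)
        have hsw2 : PySem.Str.startswith p "AccountKey=" = false := by
          rw [Bool.eq_false_iff]; intro h'; exact h2 ((hKey.mp h').2)
        have hne1 : ("AccountName" : String) ≠ String.ofList K := by
          intro h'; exact h1 (((ofList_eq_iff K _).mp h'.symm))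
        have hne2 : ("AccountKey" : String) ≠ String.ofList K := by
          intro h'; exact h2 (((ofList_eq_iff K _).mp h'.symm))
        simp only [pyAStep, hsw1, hsw2, Bool.false_eq_true, if_false]
        rw [hB]
        simp [PySem.Dict.get?_insert_of_ne d (String.ofList V) hne1,
          PySem.Dict.get?_insert_of_ne d (String.ofList V) hne2]
  · -- no '=': B skips the part, A's two guards are both false
    have hkv := splitMax1_str p
    rw [if_neg hm] at hkv
    have hsw1 : PySem.Str.startswith p "AccountName=" = false := by
      rw [Bool.eq_false_iff]; intro h'; exact hm (hName.mp h').1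
    have hsw2 : PySem.Str.startswith p "AccountKey=" = false := by
      rw [Bool.eq_false_iff]; intro h'; exact hm (hKey.mp h').1
    simp only [pyAStep, pyBStep, hsw1, hsw2, Bool.false_eq_true, if_false, hkv]

-- loop invariant: folding A's step from the dict's two lookups equals looking up B's folded dict
theorem fold_inv (parts : List String) : ∀ (d : PySem.Dict String String),
    parts.foldl pyAStep (d.get? "AccountName", d.get? "AccountKey")
      = ((parts.foldl pyBStep d).get? "AccountName", (parts.foldl pyBStep d).get? "AccountKey") := by
  induction parts with
  | nil => intro d; simp
  | cons p rest ih =>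
    intro d
    simp only [List.foldl_cons]
    rw [step_lemma d p]
    exact ih (pyBStep d p)

-- ===== VERDICT (by name: the statement is the Claim_ definition above) =====
theorem extract_account_info_from_connection_string_py_spec : Claim_equal_extract_account_info_from_connection_string_py := by
  intro conn_str _
  show extract_account_info_from_connection_string_py conn_str = extract_account_info_from_connection_string_py_alt conn_str
  unfold extract_account_info_from_connection_string_py extract_account_info_from_connection_string_py_alt
  have h0 : ((none, none) : Option String × Option String)
      = ((PySem.Dict.empty : PySem.Dict String String).get? "AccountName",
         (PySem.Dict.empty : PySem.Dict String String).get? "AccountKey") := by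
    simp [PySem.Dict.get?_empty]
  rw [h0]
  exact fold_inv _ PySem.Dict.empty
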